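-- pv_equiv track=rewrite | github.com/alikatkodia-collab/quran-knowledge-graph | retrieval_gate.py | lost_in_middle_reorder
-- ===== SOURCE A (Python) =====
-- def lost_in_middle_reorder(verses: list[dict]) -> list[dict]:
--     """
--     Reorder verses so the most relevant are at the START and END of the list.
--     LLMs attend best to positions at the beginning and end of context.
--
--     Strategy: alternate placing items at front and back.
--     Input:  [1st, 2nd, 3rd, 4th, 5th, 6th]  (ranked by relevance)
--     Output: [1st, 3rd, 5th, 6th, 4th, 2nd]   (best at edges, worst in middle)
--     """
--     if len(verses) <= 2:
--         return verses
--
--     front = []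
--     back = []
--     for i, v in enumerate(verses):
--         if i % 2 == 0:
--             front.append(v)
--         else:
--             back.append(v)
--     back.reverse()
--     return front + back
-- ===== SOURCE B (Python) =====
-- def lost_in_middle_reorder(verses: list[dict]) -> list[dict]:
--     # Same reordering via slicing: even-indexed items, then odd-indexed reversed.
--     if len(verses) <= 2:
--         return verses
--     return verses[::2] + verses[1::2][::-1]
-- ===== Notes on version B (the rewrite author's own statement) =====
-- stated objective: idiomatic
-- what changed: Replaces the enumerate loop with two parity accumulators plus an in-place reverse by a single slicing expression verses[::2] + verses[1::2][::-1].
import Mathlib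
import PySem

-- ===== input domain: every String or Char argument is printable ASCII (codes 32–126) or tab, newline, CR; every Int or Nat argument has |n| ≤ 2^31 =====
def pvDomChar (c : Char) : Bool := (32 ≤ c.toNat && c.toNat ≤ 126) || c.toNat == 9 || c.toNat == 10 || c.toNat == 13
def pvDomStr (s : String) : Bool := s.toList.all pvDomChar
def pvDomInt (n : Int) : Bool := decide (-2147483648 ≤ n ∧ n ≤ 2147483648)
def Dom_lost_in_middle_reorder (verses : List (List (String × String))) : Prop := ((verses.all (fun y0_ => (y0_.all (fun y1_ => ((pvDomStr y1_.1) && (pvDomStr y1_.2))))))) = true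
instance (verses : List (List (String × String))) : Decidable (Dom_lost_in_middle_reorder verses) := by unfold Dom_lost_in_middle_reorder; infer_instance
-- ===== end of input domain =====

-- B replaces A's enumerate loop (two parity accumulators + reverse) by the slicing
-- expression verses[::2] + verses[1::2][::-1]: an idiomatic, loop-free decomposition
-- with the same cost.


-- ===== PORT A =====
def lost_in_middle_reorder (verses : List (List (String × String))) : List (List (String × String)) :=
  if verses.length ≤ 2 then verses
  else
    let fb := (PySem.List.enumerate verses).foldl
      (fun (fb : List (List (String × String)) × List (List (String × String))) iv =>
        if PySem.Int.mod iv.1 2 == 0 then (fb.1 ++ [iv.2], fb.2) else (fb.1, fb.2 ++ [iv.2]))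
      ([], [])
    fb.1 ++ fb.2.reverse

-- ===== PORT B =====
-- B: verses[::2] + verses[1::2][::-1].  slice? never returns none here (step = 2, -1 ≠ 0),
-- so getD [] is exact.
def lost_in_middle_reorder_alt (verses : List (List (String × String))) : List (List (String × String)) :=
  if verses.length ≤ 2 then verses
  else
    let evens := (PySem.List.slice? verses none none 2).getD []
    let odds := (PySem.List.slice? verses (some 1) none 2).getD []
    evens ++ (PySem.List.slice? odds none none (-1)).getD []

-- ===== PRECONDITION & SPEC =====
def Spec_lost_in_middle_reorder (verses : List (List (String × String))) (out : List (List (String × String))) : Prop := out = lost_in_middle_reorder_alt verses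
instance (verses : List (List (String × String))) (out : List (List (String × String))) : Decidable (Spec_lost_in_middle_reorder verses out) := by unfold Spec_lost_in_middle_reorder; infer_instance

-- ===== CLAIM (what is proved, stated in full; the proofs are below) =====
def Claim_equal_lost_in_middle_reorder : Prop := ∀ (verses : List (List (String × String))), Dom_lost_in_middle_reorder verses → Spec_lost_in_middle_reorder verses (lost_in_middle_reorder verses)

-- ===== LEMMAS AND PROOFS =====

-- even-indexed elements of a list
def pvEvens {α : Type} : List α → List α
  | [] => []
  | [a] => [a]
  | a :: _ :: r => a :: pvEvens r

theorem pvEvens_cons {α : Type} (a : α) (r : List α) :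
    pvEvens (a :: r) = a :: pvEvens r.tail := by
  cases r <;> simp [pvEvens]

-- Nat-level characterisation of the [::2]-style filterMap over a range
theorem pvFilterMap_range_two {α : Type} (xs : List α) :
    (List.range ((xs.length + 1) / 2)).filterMap (fun k => xs[2 * k]?) = pvEvens xs := by
  induction xs using pvEvens.induct with
  | case1 => simp [pvEvens]
  | case2 a => simp [pvEvens]
  | case3 a b r ih =>
    have hc : ((a :: b :: r).length + 1) / 2 = (r.length + 1) / 2 + 1 := by
      simp only [List.length_cons]; omega
    rw [hc, List.range_succ_eq_map, List.filterMap_cons, List.filterMap_map]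
    simpa [pvEvens, Function.comp, Nat.mul_succ, Nat.mul_add] using ih

theorem pvSlice_two {α : Type} (xs : List α) :
    PySem.List.slice? xs none none 2 = some (pvEvens xs) := by
  simp only [PySem.List.slice?, PySem.List.sliceIndices]
  norm_num
  have hcnt : (if 0 < xs.length then ((((xs.length : Int)) + 2 - 1) / 2).toNat else 0)
      = (xs.length + 1) / 2 := by split <;> omega
  rw [hcnt, ← pvFilterMap_range_two]
  have h2 : ∀ k : Nat, ((2 : Int) * k).toNat = 2 * k := fun k => by omega
  simp only [h2]

theorem pvSlice_one_two {α : Type} (xs : List α) :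
    PySem.List.slice? xs (some 1) none 2 = some (pvEvens xs.tail) := by
  simp only [PySem.List.slice?, PySem.List.sliceIndices]
  norm_num
  rcases xs with _ | ⟨a, r⟩
  · simp [pvEvens]
  · have h1 : min (1 : Int) (((a :: r).length : Int)) = 1 := by
      simp only [List.length_cons]; omega
    rw [h1]
    have hcnt : (if 1 < (a :: r).length then ((((a :: r).length : Int) - 1 + 2 - 1) / 2).toNat else 0)
        = (r.length + 1) / 2 := by
      simp only [List.length_cons]; split <;> omega
    rw [hcnt, ← pvFilterMap_range_two]
    have h2 : ∀ k : Nat, ((1 : Int) + 2 * (k : Int)).toNat = 2 * k + 1 := fun k => by omega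
    simp only [h2, List.getElem?_cons_succ, List.tail_cons]

-- parity invariant of A's enumerate/foldl loop
theorem pvFoldA {α : Type} (xs : List α) : ∀ (n : Int) (F B : List α),
    (PySem.List.enumerate xs n).foldl
      (fun (fb : List α × List α) iv =>
        if PySem.Int.mod iv.1 2 == 0 then (fb.1 ++ [iv.2], fb.2) else (fb.1, fb.2 ++ [iv.2]))
      (F, B)
    = if PySem.Int.mod n 2 == 0 then (F ++ pvEvens xs, B ++ pvEvens xs.tail)
      else (F ++ pvEvens xs.tail, B ++ pvEvens xs) := by
  induction xs with
  | nil => intro n F B; split <;> simp [pvEvens]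
  | cons a r ih =>
    intro n F B
    have hmod : PySem.Int.mod n 2 = 0 ∨ PySem.Int.mod n 2 = 1 := by
      unfold PySem.Int.mod; rw [Int.fmod_eq_emod_of_nonneg _ (by norm_num)]; omega
    have hflip : ∀ m : Int, PySem.Int.mod m 2 = 0 → PySem.Int.mod (m + 1) 2 = 1 := by
      intro m hm
      unfold PySem.Int.mod at *
      rw [Int.fmod_eq_emod_of_nonneg _ (by norm_num)] at *
      omega
    have hflip' : ∀ m : Int, PySem.Int.mod m 2 = 1 → PySem.Int.mod (m + 1) 2 = 0 := by
      intro m hm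
      unfold PySem.Int.mod at *
      rw [Int.fmod_eq_emod_of_nonneg _ (by norm_num)] at *
      omega
    rw [PySem.List.enumerate_cons]
    simp only [List.foldl_cons]
    rcases hmod with hm | hm
    · rw [hm]
      simp only [show ((0 : Int) == 0) = true from rfl, if_true]
      rw [ih (n + 1) (F ++ [a]) B, hflip n hm]
      simp only [show ((1 : Int) == 0) = false from rfl, Bool.false_eq_true, if_false]
      simp [pvEvens_cons a r]
    · rw [hm]
      simp only [show ((1 : Int) == 0) = false from rfl, Bool.false_eq_true, if_false]
      rw [ih (n + 1) F (B ++ [a]), hflip' n hm]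
      simp only [show ((0 : Int) == 0) = true from rfl, if_true]
      simp [pvEvens_cons a r]

-- ===== VERDICT (by name: the statement is the Claim_ definition above) =====
theorem lost_in_middle_reorder_spec : Claim_equal_lost_in_middle_reorder := by
  intro verses _
  unfold Spec_lost_in_middle_reorder lost_in_middle_reorder lost_in_middle_reorder_alt
  by_cases h : verses.length ≤ 2
  · simp [h]
  · simp only [h, if_false]
    rw [pvSlice_two, pvSlice_one_two, pvFoldA verses 0 [] []]
    norm_num [PySem.Int.mod, PySem.List.slice?_none_none_neg_one]
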